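-- pv_equiv track=rewrite | github.com/pypi-data/pypi-mirror-229 | packages/PointBlaster/PointBlaster-0.2.4.tar.gz/PointBlaster-0.2.4/PointBlaster/PointBlaster.py | get_indel
-- ===== SOURCE A (Python) =====
-- def get_indel(gapped_seq, indel_seq):
--     """
--     This function finds the zone of gaps compared to the indel sequece.
--
--     """
--     insert_seq = indel_seq[0]
--     for item in range(1, len(gapped_seq)):
--         if gapped_seq[item] == '-':
--             insert_seq += indel_seq[item]
--         else:
--             break
--     return insert_seq
-- ===== SOURCE B (Python) =====
-- def get_indel(gapped_seq, indel_seq):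
--     # find the first non-gap position after 0 (index 0 is always included),
--     # then take everything up to it in one slice
--     stop = next((i for i in range(1, len(gapped_seq)) if gapped_seq[i] != '-'),
--                 max(len(gapped_seq), 1))
--     return indel_seq[:stop]
-- ===== Notes on version B (the rewrite author's own statement) =====
-- stated objective: simpler
-- what changed: B replaces the character-by-character accumulation with a boundary search (first non-gap index after 0, defaulting to max(len(gapped_seq),1)) followed by a single slice of indel_seq.
import Mathlib
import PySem

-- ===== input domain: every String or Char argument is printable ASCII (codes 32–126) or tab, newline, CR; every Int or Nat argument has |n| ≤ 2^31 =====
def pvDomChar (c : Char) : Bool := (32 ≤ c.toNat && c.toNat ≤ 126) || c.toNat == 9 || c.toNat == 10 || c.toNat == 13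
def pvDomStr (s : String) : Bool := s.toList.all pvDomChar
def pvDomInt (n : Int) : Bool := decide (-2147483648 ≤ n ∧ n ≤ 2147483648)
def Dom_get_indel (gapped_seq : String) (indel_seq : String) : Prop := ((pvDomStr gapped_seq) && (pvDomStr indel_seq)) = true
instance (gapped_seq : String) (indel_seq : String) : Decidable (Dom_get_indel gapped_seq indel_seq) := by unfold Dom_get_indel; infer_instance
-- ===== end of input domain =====

-- B replaces A's character-by-character accumulation with a boundary search plus one slice (objective: simpler).

-- ===== PORT A =====
-- loop `for item in range(1, len(gapped_seq)): if gapped_seq[item] == '-': insert_seq += indel_seq[item] else: break`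
-- state: accumulated chars; `none` = IndexError on indel_seq[item]
def pvALoop (g s acc : List Char) (i : Nat) : Option (List Char) :=
  if h : i < g.length then
    if g[i] = '-' then
      match PySem.List.pyGet? s (i : Int) with
      | none => none
      | some c => pvALoop g s (acc ++ [c]) (i + 1)
    else some acc
  else some acc
termination_by g.length - i

def get_indel (gapped_seq : String) (indel_seq : String) : String :=
  match PySem.List.pyGet? indel_seq.toList (0 : Int) with   -- indel_seq[0]
  | none => ""                                              -- IndexError (excluded by Pre_)
  | some c0 =>
    match pvALoop gapped_seq.toList indel_seq.toList [c0] 1 with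
    | none => ""                                            -- IndexError (excluded by Pre_)
    | some l => String.ofList l

-- ===== PORT B =====
-- stop = next((i for i in range(1, len(gapped_seq)) if gapped_seq[i] != '-'), max(len(gapped_seq), 1))
def pvBFind (g : List Char) (i : Nat) : Nat :=
  if h : i < g.length then
    if g[i] ≠ '-' then i else pvBFind g (i + 1)
  else max g.length 1
termination_by g.length - i

-- return indel_seq[:stop]  (stop ≥ 0, so the slice is a plain take — exact here)
def get_indel_alt (gapped_seq : String) (indel_seq : String) : String :=
  String.ofList (indel_seq.toList.take (pvBFind gapped_seq.toList 1))

-- ===== PRECONDITION & SPEC =====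
-- Pre_ excludes exactly the inputs where A raises IndexError: empty indel_seq, or a
-- leading gap run of gapped_seq reaching positions >= len(indel_seq).
def Pre_get_indel (gapped_seq : String) (indel_seq : String) : Prop :=
  indel_seq.toList ≠ [] ∧
  ((gapped_seq.toList.drop 1).takeWhile (· = '-')).length < indel_seq.toList.length
instance (gapped_seq : String) (indel_seq : String) : Decidable (Pre_get_indel gapped_seq indel_seq) := by
  unfold Pre_get_indel; infer_instance
def pvWitness_get_indel : String × String := ("A-C", "XYZ")

def Spec_get_indel (gapped_seq : String) (indel_seq : String) (out : String) : Prop := out = get_indel_alt gapped_seq indel_seq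
instance (gapped_seq : String) (indel_seq : String) (out : String) : Decidable (Spec_get_indel gapped_seq indel_seq out) := by unfold Spec_get_indel; infer_instance

-- ===== CLAIM (what is proved, stated in full; the proofs are below) =====
def Claim_equal_get_indel : Prop := ∀ (gapped_seq : String) (indel_seq : String), Dom_get_indel gapped_seq indel_seq → Pre_get_indel gapped_seq indel_seq → Spec_get_indel gapped_seq indel_seq (get_indel gapped_seq indel_seq)

-- ===== LEMMAS AND PROOFS =====

lemma pvBFind_eq (g : List Char) (i : Nat) (h1 : 1 ≤ i) (h2 : i ≤ g.length) :
    pvBFind g i = i + ((g.drop i).takeWhile (· = '-')).length := by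
  fun_induction pvBFind g i with
  | case1 i hlt hne =>
    rw [List.drop_eq_getElem_cons hlt]
    simp only [List.takeWhile]
    have : decide (g[i] = '-') = false := by simpa using hne
    simp [this]
  | case2 i hlt hgap ih =>
    rw [List.drop_eq_getElem_cons hlt]
    have hg : g[i] = '-' := by simpa using hgap
    simp only [List.takeWhile, hg]
    rw [ih (by omega) (by omega)]
    simp; omega
  | case3 i hge =>
    have : g.drop i = [] := List.drop_eq_nil_of_le (by omega)
    rw [this]
    simp; omega

lemma pvALoop_eq (g s : List Char) (i : Nat) (acc : List Char)
    (h : i + ((g.drop i).takeWhile (· = '-')).length ≤ s.length) :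
    pvALoop g s acc i = some (acc ++ (s.drop i).take ((g.drop i).takeWhile (· = '-')).length) := by
  fun_induction pvALoop g s acc i with
  | case1 acc i hlt hgap hnone =>
    -- pyGet? returned none: impossible, i < s.length
    exfalso
    rw [List.drop_eq_getElem_cons hlt] at h
    have hg : g[i] = '-' := by simpa using hgap
    simp only [List.takeWhile, hg] at h
    simp at h
    have hi : i < s.length := by omega
    rw [PySem.List.pyGet?_natCast] at hnone
    simp [List.getElem?_eq_getElem hi] at hnone
  | case2 acc i hlt hgap c hc ih =>
    have hg : g[i] = '-' := by simpa using hgap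
    rw [List.drop_eq_getElem_cons hlt] at h ⊢
    simp only [List.takeWhile, hg] at h ⊢
    simp only [decide_true, List.length_cons] at h ⊢
    rw [ih (by omega)]
    have hi : i < s.length := by omega
    rw [List.drop_eq_getElem_cons hi, List.take_succ_cons]
    rw [PySem.List.pyGet?_natCast, List.getElem?_eq_getElem hi] at hc
    injection hc with hc
    simp [hc]
  | case3 acc i hlt hgap =>
    rw [List.drop_eq_getElem_cons hlt]
    simp only [List.takeWhile]
    have : decide (g[i] = '-') = false := by simpa using hgap
    simp [this]
  | case4 acc i hge =>
    have : g.drop i = [] := List.drop_eq_nil_of_le (by omega)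
    rw [this]
    simp

-- ===== VERDICT (by name: the statement is the Claim_ definition above) =====
theorem get_indel_spec : Claim_equal_get_indel := by
  intro g s _ hpre
  obtain ⟨hne, hrun⟩ := hpre
  unfold Spec_get_indel get_indel get_indel_alt
  cases hsl : s.toList with
  | nil => exact absurd hsl hne
  | cons c t =>
    rw [hsl] at hrun
    rw [PySem.List.pyGet?_zero_cons]
    simp only [List.length_cons] at hrun
    show (match pvALoop g.toList (c :: t) [c] 1 with
          | none => ""
          | some l => String.ofList l) = String.ofList ((c :: t).take (pvBFind g.toList 1))
    rw [pvALoop_eq g.toList (c :: t) 1 [c] (by simp only [List.length_cons]; omega)]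
    simp only [List.drop_one, List.tail_cons]
    by_cases hg : g.toList = []
    · rw [hg]
      simp [pvBFind]
    · rw [pvBFind_eq g.toList 1 le_rfl (by have := List.length_pos_iff.mpr hg; omega)]
      rw [Nat.add_comm 1, List.take_succ_cons]
      simp
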